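-- pv_equiv track=rewrite | github.com/songyuew/hkecert | ecert.py | groupHex
-- ===== SOURCE A (Python) =====
-- def groupHex(hexStr):
--     temp = []
--     for i in range(0,len(hexStr),2):
--         if i != len(hexStr) - 1:
--             temp.append(hexStr[i]+hexStr[i+1])
--         else:
--             temp.append(hexStr[i])
--     return " ".join(temp)
-- ===== SOURCE B (Python) =====
-- def groupHex(hexStr):
--     parts = []
--     for k, c in enumerate(hexStr):
--         if k and k % 2 == 0:
--             parts.append(" ")
--         parts.append(c)
--     return "".join(parts)
-- ===== Notes on version B (the rewrite author's own statement) =====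
-- stated objective: alternative
-- what changed: B streams over the characters once with enumerate, emitting a separator space before every even nonzero position, instead of A's stepped range(0,len,2) loop that extracts pairs by index arithmetic with an odd-tail branch and joins them.
import Mathlib
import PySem

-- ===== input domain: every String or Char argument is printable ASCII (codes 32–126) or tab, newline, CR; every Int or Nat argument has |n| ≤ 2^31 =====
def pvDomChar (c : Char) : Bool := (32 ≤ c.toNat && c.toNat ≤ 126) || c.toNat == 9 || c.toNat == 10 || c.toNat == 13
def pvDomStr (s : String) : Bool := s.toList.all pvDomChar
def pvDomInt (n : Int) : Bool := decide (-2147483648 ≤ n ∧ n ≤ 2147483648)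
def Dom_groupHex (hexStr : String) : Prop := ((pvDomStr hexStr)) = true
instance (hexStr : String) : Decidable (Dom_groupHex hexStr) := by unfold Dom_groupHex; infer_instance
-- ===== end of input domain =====

-- B replaces A's stepped range(0,len,2) pair-extraction loop by a single streaming pass
-- that inserts a space before every even nonzero character position (objective: alternative).

-- ===== PORT A =====
-- hexStr[i] and hexStr[i+1] are ported with pyGetD: every index the loop reads
-- (i ∈ range(0,n,2); i+1 only when i ≠ n-1) is in range, so this is exact.
def groupHex (hexStr : String) : String :=
  let l := hexStr.toList
  let n : Int := PySem.Str.len hexStr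
  let temp : List (List Char) :=
    (PySem.List.pyRange 0 n 2).foldl
      (fun temp i =>
        if i ≠ n - 1 then
          temp ++ [[PySem.List.pyGetD l i ' ', PySem.List.pyGetD l (i + 1) ' ']]
        else
          temp ++ [[PySem.List.pyGetD l i ' ']])
      []
  String.mk (PySem.Chars.join [' '] temp)

-- ===== PORT B =====
-- ''.join over a list of 1-char pieces is ported as direct List Char concatenation.
def groupHex_alt (hexStr : String) : String :=
  let parts : List Char :=
    (PySem.List.enumerate hexStr.toList 0).foldl
      (fun parts kc =>
        (if kc.1 ≠ 0 ∧ PySem.Int.mod kc.1 2 = 0 then parts ++ [' '] else parts) ++ [kc.2])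
      []
  String.mk parts

-- ===== PRECONDITION & SPEC =====
def Spec_groupHex (hexStr : String) (out : String) : Prop := out = groupHex_alt hexStr
instance (hexStr : String) (out : String) : Decidable (Spec_groupHex hexStr out) := by unfold Spec_groupHex; infer_instance

-- ===== CLAIM (what is proved, stated in full; the proofs are below) =====
def Claim_equal_groupHex : Prop := ∀ (hexStr : String), Dom_groupHex hexStr → Spec_groupHex hexStr (groupHex hexStr)

-- ===== LEMMAS AND PROOFS =====

-- the list of chunks A's loop builds, by two-at-a-time recursion
def pvChunks : List Char → List (List Char)
  | [] => []
  | [a] => [[a]]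
  | a :: b :: t => [a, b] :: pvChunks t

-- the final character stream both programs produce
def pvOut : List Char → List Char
  | [] => []
  | [a] => [a]
  | a :: b :: t => a :: b :: (if t.isEmpty then [] else ' ' :: pvOut t)

-- A's loop body as a function of the Nat index k (i = 2*k)
def pvG (l : List Char) (k : Nat) : List Char :=
  if ((2 * k : Nat) : Int) ≠ (l.length : Int) - 1 then
    [l.getD (2 * k) ' ', l.getD (2 * k + 1) ' ']
  else
    [l.getD (2 * k) ' ']

-- B's loop body as a block function
def pvBlk (kc : Int × Char) : List Char :=
  (if kc.1 ≠ 0 ∧ PySem.Int.mod kc.1 2 = 0 then [' '] else []) ++ [kc.2]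

lemma pvG_succ (a b : Char) (t : List Char) (k : Nat) :
    pvG (a :: b :: t) (k + 1) = pvG t k := by
  unfold pvG
  rw [show 2 * (k + 1) = 2 * k + 1 + 1 from by omega,
      show 2 * k + 1 + 1 + 1 = (2 * k + 1) + 1 + 1 from by omega]
  simp only [List.getD_cons_succ, List.length_cons]
  by_cases h : ((2 * k : Nat) : Int) ≠ (t.length : Int) - 1
  · rw [if_pos h, if_pos (by push_cast at h ⊢; omega)]
  · rw [if_neg h, if_neg (by push_cast at h ⊢; omega)]

lemma map_pvG_eq_pvChunks (l : List Char) :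
    (List.range ((l.length + 1) / 2)).map (pvG l) = pvChunks l := by
  induction l using pvChunks.induct with
  | case1 => simp [pvChunks]
  | case2 a => simp [pvChunks, pvG]
  | case3 a b t ih =>
    have hlen : ((a :: b :: t).length + 1) / 2 = (t.length + 1) / 2 + 1 := by
      simp only [List.length_cons]; omega
    rw [hlen, List.range_succ_eq_map, List.map_cons, List.map_map]
    have h0 : pvG (a :: b :: t) 0 = [a, b] := by
      unfold pvG
      rw [if_pos (by simp only [List.length_cons]; push_cast; omega)]
      rfl
    have hmap : (List.range ((t.length + 1) / 2)).map (pvG (a :: b :: t) ∘ Nat.succ)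
        = (List.range ((t.length + 1) / 2)).map (pvG t) := by
      refine List.map_congr_left ?_
      intro k _
      exact pvG_succ a b t k
    rw [h0, hmap, ih]
    rfl

lemma groupHex_eq_chunks (s : String) :
    groupHex s = String.mk (PySem.Chars.join [' '] (pvChunks s.toList)) := by
  show String.mk (PySem.Chars.join [' ']
      ((PySem.List.pyRange 0 (PySem.Str.len s) 2).foldl
        (fun temp i =>
          if i ≠ PySem.Str.len s - 1 then
            temp ++ [[PySem.List.pyGetD s.toList i ' ', PySem.List.pyGetD s.toList (i + 1) ' ']]
          else
            temp ++ [[PySem.List.pyGetD s.toList i ' ']])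
        [])) = _
  have hstep : (fun (temp : List (List Char)) (i : Int) =>
      if i ≠ PySem.Str.len s - 1 then
        temp ++ [[PySem.List.pyGetD s.toList i ' ', PySem.List.pyGetD s.toList (i + 1) ' ']]
      else
        temp ++ [[PySem.List.pyGetD s.toList i ' ']])
      = (fun temp i => temp ++ [if i ≠ PySem.Str.len s - 1 then
          [PySem.List.pyGetD s.toList i ' ', PySem.List.pyGetD s.toList (i + 1) ' ']
        else [PySem.List.pyGetD s.toList i ' ']]) := by
    funext temp i; split_ifs <;> rfl
  rw [hstep, PySem.List.foldl_append_eq_flatMap]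
  rw [PySem.List.pyRange_of_pos 0 (PySem.Str.len s) (by norm_num)]
  rw [List.flatMap_map]
  have hcount : (if (0 : Int) < PySem.Str.len s then
      ((PySem.Str.len s - 0 + 2 - 1) / 2).toNat else 0) = (s.toList.length + 1) / 2 := by
    rw [PySem.Str.len_eq]
    split_ifs with h <;> omega
  rw [hcount]
  have hfun : ∀ k ∈ List.range ((s.toList.length + 1) / 2),
      [if (0 : Int) + 2 * (k : Int) ≠ PySem.Str.len s - 1 then
        [PySem.List.pyGetD s.toList ((0 : Int) + 2 * (k : Int)) ' ',
         PySem.List.pyGetD s.toList ((0 : Int) + 2 * (k : Int) + 1) ' ']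
      else [PySem.List.pyGetD s.toList ((0 : Int) + 2 * (k : Int)) ' ']] = [pvG s.toList k] := by
    intro k _
    have e1 : (0 : Int) + 2 * (k : Int) = ((2 * k : Nat) : Int) := by push_cast; ring
    have e2 : ((2 * k : Nat) : Int) + 1 = ((2 * k + 1 : Nat) : Int) := by push_cast; ring
    rw [e1, e2, PySem.List.pyGetD_natCast, PySem.List.pyGetD_natCast]
    unfold pvG
    rw [PySem.Str.len_eq]
  rw [List.flatMap_congr hfun, ← List.map_eq_flatMap, map_pvG_eq_pvChunks, List.nil_append]

lemma pvBlk_even_pos (m : Nat) (c : Char) :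
    pvBlk ((2 * (m : Int) + 2, c)) = [' ', c] := by
  show (if (2 * (m : Int) + 2) ≠ 0 ∧ PySem.Int.mod (2 * (m : Int) + 2) 2 = 0
      then [' '] else []) ++ [c] = [' ', c]
  rw [PySem.Int.mod_eq_emod_of_pos (by norm_num : (0 : Int) < 2)]
  rw [if_pos ⟨by omega, by omega⟩]
  rfl

lemma pvBlk_odd (i : Int) (c : Char) (h : i % 2 = 1) : pvBlk ((i, c)) = [c] := by
  show (if i ≠ 0 ∧ PySem.Int.mod i 2 = 0 then [' '] else []) ++ [c] = [c]
  rw [PySem.Int.mod_eq_emod_of_pos (by norm_num : (0 : Int) < 2)]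
  rw [if_neg (by omega)]
  rfl

lemma flatMap_pvBlk_tail (t : List Char) :
    ∀ m : Nat, (PySem.List.enumerate t (2 * (m : Int) + 2)).flatMap pvBlk
      = if t.isEmpty then [] else ' ' :: pvOut t := by
  induction t using pvOut.induct with
  | case1 => intro m; simp [PySem.List.enumerate_nil]
  | case2 a =>
    intro m
    simp only [PySem.List.enumerate_cons, PySem.List.enumerate_nil]
    simp [pvBlk_even_pos m a, pvOut]
  | case3 a b t ih =>
    intro m
    simp only [PySem.List.enumerate_cons]
    have hb : pvBlk ((2 * (m : Int) + 2 + 1, b)) = [b] :=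
      pvBlk_odd _ b (by omega)
    have hshift : (2 * (m : Int) + 2 + 1 + 1) = 2 * ((m + 1 : Nat) : Int) + 2 := by
      push_cast; ring
    simp only [List.flatMap_cons, pvBlk_even_pos m a, hb, hshift, ih (m + 1)]
    simp [pvOut]

lemma flatMap_pvBlk (l : List Char) :
    (PySem.List.enumerate l 0).flatMap pvBlk = pvOut l := by
  induction l using pvOut.induct with
  | case1 => simp [PySem.List.enumerate_nil, pvOut]
  | case2 a =>
    simp only [PySem.List.enumerate_cons, PySem.List.enumerate_nil]
    simp [pvBlk, pvOut]
  | case3 a b t ih =>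
    simp only [PySem.List.enumerate_cons]
    have ha : pvBlk ((0, a)) = [a] := by simp [pvBlk]
    have hb : pvBlk ((0 + 1, b)) = [b] := pvBlk_odd _ b (by norm_num)
    have hshift : ((0 : Int) + 1 + 1) = 2 * ((0 : Nat) : Int) + 2 := by norm_num
    simp only [List.flatMap_cons, ha, hb, hshift, flatMap_pvBlk_tail t 0]
    simp [pvOut]

lemma pvChunks_ne_nil (x : Char) (xs : List Char) : pvChunks (x :: xs) ≠ [] := by
  cases xs <;> simp [pvChunks]

lemma join_pvChunks (l : List Char) :
    PySem.Chars.join [' '] (pvChunks l) = pvOut l := by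
  induction l using pvOut.induct with
  | case1 => simp [pvChunks, pvOut, PySem.Chars.join_nil]
  | case2 a => simp [pvChunks, pvOut, PySem.Chars.join_singleton]
  | case3 a b t ih =>
    cases t with
    | nil => simp [pvChunks, pvOut, PySem.Chars.join_singleton]
    | cons x xs =>
      obtain ⟨q, rest, hq⟩ : ∃ q rest, pvChunks (x :: xs) = q :: rest := by
        rcases h : pvChunks (x :: xs) with _ | ⟨q, rest⟩
        · exact absurd h (pvChunks_ne_nil x xs)
        · exact ⟨q, rest, rfl⟩
      show PySem.Chars.join [' '] ([a, b] :: pvChunks (x :: xs)) = pvOut (a :: b :: x :: xs)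
      rw [hq, PySem.Chars.join_cons_cons, ← hq, ih]
      simp [pvOut]

lemma groupHex_alt_eq (s : String) :
    groupHex_alt s = String.mk ((PySem.List.enumerate s.toList 0).flatMap pvBlk) := by
  unfold groupHex_alt
  have hstep : (fun (parts : List Char) (kc : Int × Char) =>
      (if kc.1 ≠ 0 ∧ PySem.Int.mod kc.1 2 = 0 then parts ++ [' '] else parts) ++ [kc.2])
      = (fun parts kc => parts ++ pvBlk kc) := by
    funext parts kc
    unfold pvBlk
    split_ifs <;> simp
  rw [hstep, PySem.List.foldl_append_eq_flatMap]
  rfl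

-- ===== VERDICT (by name: the statement is the Claim_ definition above) =====
theorem groupHex_spec : Claim_equal_groupHex := by
  intro s _
  unfold Spec_groupHex
  rw [groupHex_eq_chunks, groupHex_alt_eq, flatMap_pvBlk, join_pvChunks]
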